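-- pv_equiv track=rewrite | github.com/BogatyrevDm/Python_4_HW | Урок 1. Практическое задание/task_2.py | sort_quadratic
-- ===== SOURCE A (Python) =====
-- def sort_quadratic(list_to_check):
--     min_value = 0
--     for i in range(len(list_to_check)): # O(len(list_to_check))
--         value_to_check = list_to_check[i] # O(1)
--         if (i == 1): # O(1)
--             min_value = value_to_check # O(1)
--         for j in range(len(list_to_check)): # O(len(list_to_check))
--             if (value_to_check < list_to_check[j] and list_to_check[j] < min_value): # O(1)
--                 min_value = value_to_check # O(1)
--     return min_value # O(1)
-- ===== SOURCE B (Python) =====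
-- def sort_quadratic(list_to_check):
--     s = sorted(list_to_check)
--     n = len(s)
--     min_value = 0
--     for i in range(n):
--         value_to_check = list_to_check[i]
--         if i == 1:
--             min_value = value_to_check
--         # binary search: lo = index of first element of s strictly greater than value_to_check
--         lo = 0
--         hi = n
--         while lo < hi:
--             mid = (lo + hi) // 2
--             if s[mid] <= value_to_check:
--                 lo = mid + 1
--             else:
--                 hi = mid
--         # some element lies strictly between value_to_check and min_value
--         # iff the smallest element > value_to_check does
--         if lo < n and s[lo] < min_value:
--             min_value = value_to_check
--     return min_value
-- ===== Notes on version B (the rewrite author's own statement) =====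
-- stated objective: faster
-- what changed: The O(n) inner existence scan is replaced by one precomputed sorted copy plus a hand-written binary search per outer step: an element strictly between value and min_value exists iff the smallest element greater than value is below min_value.
import Mathlib
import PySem

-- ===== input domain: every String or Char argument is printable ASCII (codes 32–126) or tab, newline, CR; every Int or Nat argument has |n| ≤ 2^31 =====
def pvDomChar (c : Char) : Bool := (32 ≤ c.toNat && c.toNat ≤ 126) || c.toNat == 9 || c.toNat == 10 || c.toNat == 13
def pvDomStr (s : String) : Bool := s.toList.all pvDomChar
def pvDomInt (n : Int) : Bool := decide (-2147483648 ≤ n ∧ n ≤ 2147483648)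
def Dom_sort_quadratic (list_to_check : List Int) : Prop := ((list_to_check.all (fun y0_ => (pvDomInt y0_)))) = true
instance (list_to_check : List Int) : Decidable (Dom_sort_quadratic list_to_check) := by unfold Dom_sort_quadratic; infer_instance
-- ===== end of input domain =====

-- B replaces A's O(n) inner existence scan by a sorted copy + binary search per step (measured faster; asymptotic change).

-- ===== PORT A =====
def sort_quadratic (list_to_check : List Int) : Int :=
  (PySem.List.pyRange 0 list_to_check.length 1).foldl
    (fun min_value i =>
      let value_to_check := PySem.List.pyGetD list_to_check i 0
      let min_value := if i = 1 then value_to_check else min_value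
      (PySem.List.pyRange 0 list_to_check.length 1).foldl
        (fun m j =>
          if value_to_check < PySem.List.pyGetD list_to_check j 0 ∧
             PySem.List.pyGetD list_to_check j 0 < m then value_to_check else m)
        min_value)
    0

-- ===== PORT B =====
-- hand-written binary search from Source B: first index in [lo, hi) of s whose element is > v (s sorted)
def pvBisectGT (s : List Int) (v : Int) (lo hi : Nat) : Nat :=
  if _h : lo < hi then
    let mid := (lo + hi) / 2
    if PySem.List.pyGetD s (mid : Int) 0 ≤ v then pvBisectGT s v (mid + 1) hi
    else pvBisectGT s v lo mid
  else lo
termination_by hi - lo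
decreasing_by all_goals omega

def sort_quadratic_alt (list_to_check : List Int) : Int :=
  let s := PySem.List.sorted list_to_check (fun x => x) false
  let n := s.length
  (PySem.List.pyRange 0 n 1).foldl
    (fun min_value i =>
      let value_to_check := PySem.List.pyGetD list_to_check i 0
      let min_value := if i = 1 then value_to_check else min_value
      let lo := pvBisectGT s value_to_check 0 n
      if lo < n ∧ PySem.List.pyGetD s (lo : Int) 0 < min_value then value_to_check
      else min_value)
    0

-- ===== PRECONDITION & SPEC =====
def Spec_sort_quadratic (list_to_check : List Int) (out : Int) : Prop := out = sort_quadratic_alt list_to_check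
instance (list_to_check : List Int) (out : Int) : Decidable (Spec_sort_quadratic list_to_check out) := by unfold Spec_sort_quadratic; infer_instance

-- ===== CLAIM (what is proved, stated in full; the proofs are below) =====
def Claim_equal_sort_quadratic : Prop := ∀ (list_to_check : List Int), Dom_sort_quadratic list_to_check → Spec_sort_quadratic list_to_check (sort_quadratic list_to_check)

-- ===== LEMMAS AND PROOFS =====

theorem pv_sorted_mono {s : List Int} (hs : s.Pairwise (· ≤ ·)) {i j : Nat}
    (hij : i ≤ j) (hj : j < s.length) : s[i]'(lt_of_le_of_lt hij hj) ≤ s[j] := by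
  rcases Nat.lt_or_ge i j with h | h
  · exact (List.pairwise_iff_getElem.mp hs) i j _ hj h
  · have : i = j := le_antisymm hij h
    subst this; exact le_refl _

theorem pvBisectGT_spec (s : List Int) (v : Int) :
    ∀ (lo hi : Nat), s.Pairwise (· ≤ ·) → hi ≤ s.length → lo ≤ hi →
    (∀ j, j < lo → (hj : j < s.length) → s[j] ≤ v) →
    (∀ j, hi ≤ j → (hj : j < s.length) → v < s[j]) →
    pvBisectGT s v lo hi ≤ s.length ∧
    (∀ j, j < pvBisectGT s v lo hi → (hj : j < s.length) → s[j] ≤ v) ∧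
    (∀ j, pvBisectGT s v lo hi ≤ j → (hj : j < s.length) → v < s[j]) := by
  intro lo hi
  induction lo, hi using pvBisectGT.induct s v with
  | case1 lo hi h mid hle ih =>
      intro hs hhi hlohi hlow hhigh
      have hmid : mid < s.length := by omega
      have hget : PySem.List.pyGetD s (mid : Int) 0 = s[mid] := by
        simp [PySem.List.pyGetD_natCast, hmid]
      rw [pvBisectGT]
      simp only [dif_pos h]
      split_ifs with hc
      · apply ih hs hhi (by omega)
        · intro j hj hjlen
          have : s[j] ≤ s[mid] := pv_sorted_mono hs (by omega) hmid
          rw [hget] at hle; omega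
        · exact hhigh
      · exact absurd hle hc

  | case2 lo hi h mid hgt ih =>
      intro hs hhi hlohi hlow hhigh
      have hmid : mid < s.length := by omega
      have hget : PySem.List.pyGetD s (mid : Int) 0 = s[mid] := by
        simp [PySem.List.pyGetD_natCast, hmid]
      rw [pvBisectGT]
      simp only [dif_pos h]
      split_ifs with hc
      · exact absurd hc hgt
      · apply ih hs (by omega) (by omega)
        · exact hlow
        · intro j hj hjlen
          have : s[mid] ≤ s[j] := pv_sorted_mono hs hj hjlen
          rw [hget] at hgt; omega
  | case3 lo hi h =>
      intro hs hhi hlohi hlow hhigh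
      rw [pvBisectGT]
      simp only [dif_neg h]
      exact ⟨by omega, hlow, fun j hj hjlen => hhigh j (by omega) hjlen⟩

theorem pv_test_iff (s : List Int) (v m : Int) (hs : s.Pairwise (· ≤ ·)) :
    (pvBisectGT s v 0 s.length < s.length ∧
      PySem.List.pyGetD s ((pvBisectGT s v 0 s.length : Nat) : Int) 0 < m)
    ↔ ∃ x ∈ s, v < x ∧ x < m := by
  obtain ⟨hle, hlow, hhigh⟩ := pvBisectGT_spec s v 0 s.length hs (le_refl _) (by omega)
    (by omega) (fun j hj hjlen => absurd hjlen (by omega))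
  set r := pvBisectGT s v 0 s.length with hr
  constructor
  · rintro ⟨hrn, hlt⟩
    have hget : PySem.List.pyGetD s ((r : Nat) : Int) 0 = s[r] := by
      simp [PySem.List.pyGetD_natCast, hrn]
    refine ⟨s[r], List.getElem_mem hrn, hhigh r (le_refl _) hrn, ?_⟩
    rw [hget] at hlt; exact hlt
  · rintro ⟨x, hx, hvx, hxm⟩
    obtain ⟨j, hjlen, hje⟩ := List.getElem_of_mem hx
    have hrj : r ≤ j := by
      by_contra hc
      have := hlow j (by omega) hjlen
      omega
    have hrn : r < s.length := by omega
    have hget : PySem.List.pyGetD s ((r : Nat) : Int) 0 = s[r] := by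
      simp [PySem.List.pyGetD_natCast, hrn]
    refine ⟨hrn, ?_⟩
    rw [hget]
    have : s[r] ≤ s[j] := pv_sorted_mono hs hrj hjlen
    omega

theorem pv_innerA_stay (xs : List Int) (idx : List Int) (v : Int) :
    idx.foldl (fun m j =>
        if v < PySem.List.pyGetD xs j 0 ∧ PySem.List.pyGetD xs j 0 < m then v else m) v = v := by
  induction idx with
  | nil => rfl
  | cons j t ih =>
      simp only [List.foldl_cons]
      have : ¬ (v < PySem.List.pyGetD xs j 0 ∧ PySem.List.pyGetD xs j 0 < v) := by
        rintro ⟨h1, h2⟩; omega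
      rw [if_neg this]; exact ih

theorem pv_innerA_eq (xs : List Int) (idx : List Int) (v m : Int) :
    idx.foldl (fun m j =>
        if v < PySem.List.pyGetD xs j 0 ∧ PySem.List.pyGetD xs j 0 < m then v else m) m
    = if ∃ j ∈ idx, v < PySem.List.pyGetD xs j 0 ∧ PySem.List.pyGetD xs j 0 < m then v else m := by
  induction idx generalizing m with
  | nil => simp
  | cons j t ih =>
      simp only [List.foldl_cons]
      by_cases hc : v < PySem.List.pyGetD xs j 0 ∧ PySem.List.pyGetD xs j 0 < m
      · rw [if_pos hc, pv_innerA_stay, if_pos ⟨j, List.mem_cons_self, hc⟩]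
      · rw [if_neg hc, ih]
        congr 1
        simp only [List.mem_cons, eq_iff_iff]
        constructor
        · rintro ⟨k, hk, hp⟩; exact ⟨k, Or.inr hk, hp⟩
        · rintro ⟨k, hk | hk, hp⟩
          · subst hk; exact absurd hp hc
          · exact ⟨k, hk, hp⟩

theorem pv_exists_idx (xs : List Int) (v m : Int) :
    (∃ j ∈ PySem.List.pyRange 0 xs.length 1,
        v < PySem.List.pyGetD xs j 0 ∧ PySem.List.pyGetD xs j 0 < m)
    ↔ ∃ x ∈ xs, v < x ∧ x < m := by
  constructor
  · rintro ⟨j, hj, hp⟩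
    rw [PySem.List.mem_pyRange_one] at hj
    have hx : PySem.List.pyGetD xs j 0 ∈ xs := by
      rw [PySem.List.pyGetD_eq_getElem xs 0 hj.1 hj.2]
      exact List.getElem_mem _
    exact ⟨_, hx, hp⟩
  · rintro ⟨x, hx, hp⟩
    obtain ⟨k, hk, hke⟩ := List.getElem_of_mem hx
    refine ⟨(k : Int), ?_, ?_⟩
    · rw [PySem.List.mem_pyRange_one]; constructor <;> [omega; exact_mod_cast hk]
    · have : PySem.List.pyGetD xs (k : Int) 0 = xs[k] := by
        simp [PySem.List.pyGetD_natCast, hk]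
      rw [this, hke]; exact hp

theorem sort_quadratic_eq_alt (xs : List Int) : sort_quadratic xs = sort_quadratic_alt xs := by
  unfold sort_quadratic sort_quadratic_alt
  have hs : (PySem.List.sorted xs (fun x => x) false).Pairwise (· ≤ ·) :=
    PySem.List.sorted_pairwise xs (fun x => x)
  have hlen : (PySem.List.sorted xs (fun x => x) false).length = xs.length :=
    PySem.List.length_sorted xs (fun x => x) false
  simp only [hlen]
  congr 1
  funext m i
  rw [pv_innerA_eq]
  refine if_congr ?_ rfl rfl
  have T := pv_test_iff (PySem.List.sorted xs fun x => x) (PySem.List.pyGetD xs i 0)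
      (if i = 1 then PySem.List.pyGetD xs i 0 else m) hs
  rw [hlen] at T
  rw [pv_exists_idx, T]
  simp only [PySem.List.mem_sorted]

-- ===== VERDICT (by name: the statement is the Claim_ definition above) =====
theorem sort_quadratic_spec : Claim_equal_sort_quadratic := by
  intro xs _
  exact sort_quadratic_eq_alt xs
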